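-- pv_equiv track=rewrite | github.com/pythonjeff/lox | dashboard/news_utils.py | get_event_source_url
-- ===== SOURCE A (Python) =====
-- def get_event_source_url(event_name: str) -> str:
--     """Map economic event names to authoritative source URLs."""
--     event_lower = event_name.lower()
--
--     # Federal Reserve / FOMC
--     if any(kw in event_lower for kw in ['fomc', 'fed ', 'federal reserve', 'powell', 'rate decision']):
--         return "https://www.federalreserve.gov/monetarypolicy/fomccalendars.htm"
--
--     # Treasury / Auctions
--     if any(kw in event_lower for kw in ['treasury', 'auction', 't-bill', 't-bond', 't-note']):
--         return "https://www.treasurydirect.gov/auctions/upcoming/"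
--
--     # Employment / Jobs (BLS)
--     if any(kw in event_lower for kw in ['payroll', 'employment', 'unemployment', 'jobless', 'nonfarm', 'jobs']):
--         return "https://www.bls.gov/news.release/empsit.toc.htm"
--
--     # Inflation - CPI (BLS)
--     if 'cpi' in event_lower or 'consumer price' in event_lower:
--         return "https://www.bls.gov/cpi/"
--
--     # Inflation - PCE (BEA)
--     if 'pce' in event_lower or 'personal consumption' in event_lower:
--         return "https://www.bea.gov/data/personal-consumption-expenditures-price-index"
--
--     # GDP (BEA)
--     if 'gdp' in event_lower or 'gross domestic' in event_lower:
--         return "https://www.bea.gov/data/gdp/gross-domestic-product"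
--
--     # Retail Sales (Census)
--     if 'retail' in event_lower:
--         return "https://www.census.gov/retail/index.html"
--
--     # Housing (Census)
--     if any(kw in event_lower for kw in ['housing', 'home sales', 'building permits', 'housing starts']):
--         return "https://www.census.gov/construction/nrc/index.html"
--
--     # ISM / PMI
--     if any(kw in event_lower for kw in ['ism', 'pmi', 'manufacturing index', 'services index']):
--         return "https://www.ismworld.org/supply-management-news-and-reports/reports/ism-report-on-business/"
--
--     # Durable Goods (Census)
--     if 'durable' in event_lower:
--         return "https://www.census.gov/manufacturing/m3/index.html"
--
--     # Consumer Confidence (Conference Board)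
--     if 'consumer confidence' in event_lower or 'consumer sentiment' in event_lower:
--         return "https://www.conference-board.org/topics/consumer-confidence"
--
--     # Default: Trading Economics calendar
--     return "https://tradingeconomics.com/united-states/calendar"
-- ===== SOURCE B (Python) =====
-- # Flat priority-ordered (keyword, url) table: groups are dissolved, every keyword
-- # carries its url; priority is list position.
-- KEYWORD_URLS = [
--     ("fomc", "https://www.federalreserve.gov/monetarypolicy/fomccalendars.htm"),
--     ("fed ", "https://www.federalreserve.gov/monetarypolicy/fomccalendars.htm"),
--     ("federal reserve", "https://www.federalreserve.gov/monetarypolicy/fomccalendars.htm"),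
--     ("powell", "https://www.federalreserve.gov/monetarypolicy/fomccalendars.htm"),
--     ("rate decision", "https://www.federalreserve.gov/monetarypolicy/fomccalendars.htm"),
--     ("treasury", "https://www.treasurydirect.gov/auctions/upcoming/"),
--     ("auction", "https://www.treasurydirect.gov/auctions/upcoming/"),
--     ("t-bill", "https://www.treasurydirect.gov/auctions/upcoming/"),
--     ("t-bond", "https://www.treasurydirect.gov/auctions/upcoming/"),
--     ("t-note", "https://www.treasurydirect.gov/auctions/upcoming/"),
--     ("payroll", "https://www.bls.gov/news.release/empsit.toc.htm"),
--     ("employment", "https://www.bls.gov/news.release/empsit.toc.htm"),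
--     ("unemployment", "https://www.bls.gov/news.release/empsit.toc.htm"),
--     ("jobless", "https://www.bls.gov/news.release/empsit.toc.htm"),
--     ("nonfarm", "https://www.bls.gov/news.release/empsit.toc.htm"),
--     ("jobs", "https://www.bls.gov/news.release/empsit.toc.htm"),
--     ("cpi", "https://www.bls.gov/cpi/"),
--     ("consumer price", "https://www.bls.gov/cpi/"),
--     ("pce", "https://www.bea.gov/data/personal-consumption-expenditures-price-index"),
--     ("personal consumption", "https://www.bea.gov/data/personal-consumption-expenditures-price-index"),
--     ("gdp", "https://www.bea.gov/data/gdp/gross-domestic-product"),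
--     ("gross domestic", "https://www.bea.gov/data/gdp/gross-domestic-product"),
--     ("retail", "https://www.census.gov/retail/index.html"),
--     ("housing", "https://www.census.gov/construction/nrc/index.html"),
--     ("home sales", "https://www.census.gov/construction/nrc/index.html"),
--     ("building permits", "https://www.census.gov/construction/nrc/index.html"),
--     ("housing starts", "https://www.census.gov/construction/nrc/index.html"),
--     ("ism", "https://www.ismworld.org/supply-management-news-and-reports/reports/ism-report-on-business/"),
--     ("pmi", "https://www.ismworld.org/supply-management-news-and-reports/reports/ism-report-on-business/"),
--     ("manufacturing index", "https://www.ismworld.org/supply-management-news-and-reports/reports/ism-report-on-business/"),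
--     ("services index", "https://www.ismworld.org/supply-management-news-and-reports/reports/ism-report-on-business/"),
--     ("durable", "https://www.census.gov/manufacturing/m3/index.html"),
--     ("consumer confidence", "https://www.conference-board.org/topics/consumer-confidence"),
--     ("consumer sentiment", "https://www.conference-board.org/topics/consumer-confidence"),
-- ]
--
-- DEFAULT_URL = "https://tradingeconomics.com/united-states/calendar"
--
--
-- def get_event_source_url(event_name: str) -> str:
--     """Map economic event names to authoritative source URLs.
--
--     Reverse fold over the flat keyword table: walk it lowest priority first,
--     overwriting the accumulator on every match, so the last overwrite (the
--     highest-priority matching keyword) wins.  No early exit, no grouped any().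
--     """
--     event_lower = event_name.lower()
--     url = DEFAULT_URL
--     for kw, u in reversed(KEYWORD_URLS):
--         if kw in event_lower:
--             url = u
--     return url
-- ===== Notes on version B (the rewrite author's own statement) =====
-- stated objective: alternative
-- what changed: B dissolves A's eleven keyword groups into one flat priority-ordered (keyword,url) list and computes the answer back-to-front: a reverse fold over the whole table that overwrites an accumulator on every match (no early return, no per-group any()), so the final overwrite is the highest-priority matching keyword.
import Mathlib
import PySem

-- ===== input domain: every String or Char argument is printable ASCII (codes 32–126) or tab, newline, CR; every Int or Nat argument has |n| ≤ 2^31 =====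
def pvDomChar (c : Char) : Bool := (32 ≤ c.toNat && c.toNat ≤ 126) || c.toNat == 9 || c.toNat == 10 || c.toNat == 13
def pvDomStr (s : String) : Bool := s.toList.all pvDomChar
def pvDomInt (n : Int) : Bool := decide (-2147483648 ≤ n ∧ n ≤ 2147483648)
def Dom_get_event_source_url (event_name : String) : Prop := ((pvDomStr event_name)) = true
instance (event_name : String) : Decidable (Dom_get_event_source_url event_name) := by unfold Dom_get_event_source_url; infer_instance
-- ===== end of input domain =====

-- B dissolves A's keyword groups into one flat priority-ordered table and computes the
-- answer by a reverse fold that overwrites an accumulator on every match (alternative; same cost).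

-- ===== PORT A =====
def get_event_source_url (event_name : String) : String :=
  let event_lower := PySem.Str.lower event_name
  if ["fomc", "fed ", "federal reserve", "powell", "rate decision"].any
      (fun kw => PySem.Str.isIn kw event_lower) then
    "https://www.federalreserve.gov/monetarypolicy/fomccalendars.htm"
  else if ["treasury", "auction", "t-bill", "t-bond", "t-note"].any
      (fun kw => PySem.Str.isIn kw event_lower) then
    "https://www.treasurydirect.gov/auctions/upcoming/"
  else if ["payroll", "employment", "unemployment", "jobless", "nonfarm", "jobs"].any
      (fun kw => PySem.Str.isIn kw event_lower) then
    "https://www.bls.gov/news.release/empsit.toc.htm"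
  else if PySem.Str.isIn "cpi" event_lower || PySem.Str.isIn "consumer price" event_lower then
    "https://www.bls.gov/cpi/"
  else if PySem.Str.isIn "pce" event_lower || PySem.Str.isIn "personal consumption" event_lower then
    "https://www.bea.gov/data/personal-consumption-expenditures-price-index"
  else if PySem.Str.isIn "gdp" event_lower || PySem.Str.isIn "gross domestic" event_lower then
    "https://www.bea.gov/data/gdp/gross-domestic-product"
  else if PySem.Str.isIn "retail" event_lower then
    "https://www.census.gov/retail/index.html"
  else if ["housing", "home sales", "building permits", "housing starts"].any
      (fun kw => PySem.Str.isIn kw event_lower) then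
    "https://www.census.gov/construction/nrc/index.html"
  else if ["ism", "pmi", "manufacturing index", "services index"].any
      (fun kw => PySem.Str.isIn kw event_lower) then
    "https://www.ismworld.org/supply-management-news-and-reports/reports/ism-report-on-business/"
  else if PySem.Str.isIn "durable" event_lower then
    "https://www.census.gov/manufacturing/m3/index.html"
  else if PySem.Str.isIn "consumer confidence" event_lower || PySem.Str.isIn "consumer sentiment" event_lower then
    "https://www.conference-board.org/topics/consumer-confidence"
  else
    "https://tradingeconomics.com/united-states/calendar"

-- ===== PORT B =====
-- Flat priority-ordered (keyword, url) table (groups dissolved).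
def pvKeywordUrls : List (String × String) :=
  [ ("fomc", "https://www.federalreserve.gov/monetarypolicy/fomccalendars.htm"),
    ("fed ", "https://www.federalreserve.gov/monetarypolicy/fomccalendars.htm"),
    ("federal reserve", "https://www.federalreserve.gov/monetarypolicy/fomccalendars.htm"),
    ("powell", "https://www.federalreserve.gov/monetarypolicy/fomccalendars.htm"),
    ("rate decision", "https://www.federalreserve.gov/monetarypolicy/fomccalendars.htm"),
    ("treasury", "https://www.treasurydirect.gov/auctions/upcoming/"),
    ("auction", "https://www.treasurydirect.gov/auctions/upcoming/"),
    ("t-bill", "https://www.treasurydirect.gov/auctions/upcoming/"),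
    ("t-bond", "https://www.treasurydirect.gov/auctions/upcoming/"),
    ("t-note", "https://www.treasurydirect.gov/auctions/upcoming/"),
    ("payroll", "https://www.bls.gov/news.release/empsit.toc.htm"),
    ("employment", "https://www.bls.gov/news.release/empsit.toc.htm"),
    ("unemployment", "https://www.bls.gov/news.release/empsit.toc.htm"),
    ("jobless", "https://www.bls.gov/news.release/empsit.toc.htm"),
    ("nonfarm", "https://www.bls.gov/news.release/empsit.toc.htm"),
    ("jobs", "https://www.bls.gov/news.release/empsit.toc.htm"),
    ("cpi", "https://www.bls.gov/cpi/"),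
    ("consumer price", "https://www.bls.gov/cpi/"),
    ("pce", "https://www.bea.gov/data/personal-consumption-expenditures-price-index"),
    ("personal consumption", "https://www.bea.gov/data/personal-consumption-expenditures-price-index"),
    ("gdp", "https://www.bea.gov/data/gdp/gross-domestic-product"),
    ("gross domestic", "https://www.bea.gov/data/gdp/gross-domestic-product"),
    ("retail", "https://www.census.gov/retail/index.html"),
    ("housing", "https://www.census.gov/construction/nrc/index.html"),
    ("home sales", "https://www.census.gov/construction/nrc/index.html"),
    ("building permits", "https://www.census.gov/construction/nrc/index.html"),
    ("housing starts", "https://www.census.gov/construction/nrc/index.html"),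
    ("ism", "https://www.ismworld.org/supply-management-news-and-reports/reports/ism-report-on-business/"),
    ("pmi", "https://www.ismworld.org/supply-management-news-and-reports/reports/ism-report-on-business/"),
    ("manufacturing index", "https://www.ismworld.org/supply-management-news-and-reports/reports/ism-report-on-business/"),
    ("services index", "https://www.ismworld.org/supply-management-news-and-reports/reports/ism-report-on-business/"),
    ("durable", "https://www.census.gov/manufacturing/m3/index.html"),
    ("consumer confidence", "https://www.conference-board.org/topics/consumer-confidence"),
    ("consumer sentiment", "https://www.conference-board.org/topics/consumer-confidence") ]

def pvDefaultUrl : String := "https://tradingeconomics.com/united-states/calendar"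

-- for kw, u in reversed(KEYWORD_URLS): if kw in event_lower: url = u
def get_event_source_url_alt (event_name : String) : String :=
  let event_lower := PySem.Str.lower event_name
  pvKeywordUrls.reverse.foldl
    (fun url p => if PySem.Str.isIn p.1 event_lower then p.2 else url)
    pvDefaultUrl

-- ===== PRECONDITION & SPEC =====
def Spec_get_event_source_url (event_name : String) (out : String) : Prop := out = get_event_source_url_alt event_name
instance (event_name : String) (out : String) : Decidable (Spec_get_event_source_url event_name out) := by unfold Spec_get_event_source_url; infer_instance

-- ===== CLAIM =====
def Claim_equal_get_event_source_url : Prop := ∀ (event_name : String), Dom_get_event_source_url event_name → Spec_get_event_source_url event_name (get_event_source_url event_name)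

-- ===== LEMMAS AND PROOFS =====

-- First-match over a (keyword, url) list, as a nested-if recursion.
def firstMatch (P : String → Bool) (d : String) : List (String × String) → String
  | [] => d
  | p :: rest => if P p.1 then p.2 else firstMatch P d rest

-- Reverse fold with overwrite computes the first match of the list.
theorem revfold_eq_find (L : List (String × String)) (P : String → Bool) (d : String) :
    L.reverse.foldl (fun url p => if P p.1 then p.2 else url) d = firstMatch P d L := by
  induction L with
  | nil => simp [firstMatch]
  | cons p rest ih =>
      simp only [List.reverse_cons, List.foldl_append, List.foldl_cons, List.foldl_nil, ih,
        firstMatch]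

-- Collapse 'if a then u else if b then u else X' into a disjunction.
theorem if_or_collapse (a b : Bool) (u X : String) :
    (if a then u else if b then u else X) = (if (a || b) then u else X) := by
  cases a <;> cases b <;> simp

-- ===== VERDICT =====
set_option maxHeartbeats 1000000 in
theorem get_event_source_url_spec : Claim_equal_get_event_source_url := by
  intro s _
  simp only [Spec_get_event_source_url, get_event_source_url, get_event_source_url_alt]
  rw [revfold_eq_find pvKeywordUrls (fun k => PySem.Str.isIn k (PySem.Str.lower s)) pvDefaultUrl]
  simp only [pvKeywordUrls, pvDefaultUrl, firstMatch]
  simp only [List.any_cons, List.any_nil, Bool.or_false]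
  simp only [if_or_collapse]
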